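-- pv_equiv track=rewrite | github.com/kevinchou0518/2023-NYCU-AI-FINAL | extrative_method.py | sent_tokenizer
-- ===== SOURCE A (Python) =====
-- def sent_tokenizer(texts):
--     start = 0
--     i = 0
--     sentences = []
--     punt_list = ',.:?!;~，。：？！；～'
--
--     for text in texts:
--         if text in punt_list and token not in punt_list:
--             sentences.append(texts[start : i+1])
--             start = i + 1
--             i += 1
--         else:
--             i += 1
--             token = list(texts[start : i+2]).pop()
--     if start < len(texts):
--         sentences.append(texts[start:])
--     return sentences
-- ===== SOURCE B (Python) =====
-- from itertools import groupby
--
-- def sent_tokenizer(texts):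
--     punt_list = ',.:?!;~，。：？！；～'
--     runs = [''.join(g) for _, g in groupby(texts, key=lambda c: c in punt_list)]
--     sentences = []
--     cur = ''
--     for idx, run in enumerate(runs):
--         cur += run
--         if run[0] in punt_list and idx < len(runs) - 1:
--             sentences.append(cur)
--             cur = ''
--     if cur:
--         sentences.append(cur)
--     return sentences
-- ===== Notes on version B (the rewrite author's own statement) =====
-- stated objective: faster
-- what changed: B is a staged runs-based tokenizer: it first groups the text into maximal punctuation/non-punctuation runs with itertools.groupby, then assembles one sentence per run-pair (cutting after every punctuation run that is not last), instead of A's per-character scan whose stale lookahead variable is recomputed each step via an O(n) slice copy (list(texts[start:i+2]).pop()).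
import Mathlib
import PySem

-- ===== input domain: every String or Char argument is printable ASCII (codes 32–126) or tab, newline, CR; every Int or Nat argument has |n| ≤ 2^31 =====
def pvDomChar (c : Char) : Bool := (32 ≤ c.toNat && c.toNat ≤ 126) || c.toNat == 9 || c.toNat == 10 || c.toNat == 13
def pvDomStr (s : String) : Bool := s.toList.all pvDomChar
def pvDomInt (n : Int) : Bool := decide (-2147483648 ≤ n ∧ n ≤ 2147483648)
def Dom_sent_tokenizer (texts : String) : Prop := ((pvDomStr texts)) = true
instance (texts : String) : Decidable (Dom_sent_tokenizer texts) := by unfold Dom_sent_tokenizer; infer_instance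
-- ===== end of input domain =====

-- B replaces A's per-character scan (with its O(n) lookahead slice each step) by a staged runs
-- decomposition: group the text into maximal punctuation / non-punctuation runs, then assemble
-- a sentence from each run up to the end of a punctuation run that is not the last run.

def pvPunt : List Char := ",.:?!;~，。：？！；～".toList

-- ===== PORT A =====
-- `token not in punt_list`: `token` is `none` before its first assignment (Python raises NameError
-- there; those inputs are excluded by Pre_); Option.any makes the condition False in that case.
-- list(...).pop() is PySem.List.pop? at index -1 (the slice is never empty when A runs normally).
def sentStepA (texts : String) (st : Int × Int × List String × Option Char) (text : Char) :
    Int × Int × List String × Option Char :=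
  match st with
  | (start, i, sentences, token) =>
    if text ∈ pvPunt ∧ token.any (fun t => !decide (t ∈ pvPunt)) = true then
      (i + 1, i + 1, sentences ++ [PySem.Str.slice texts (some start) (some (i + 1))], token)
    else
      (start, i + 1, sentences,
        (PySem.List.pop? (PySem.Str.slice texts (some start) (some (i + 1 + 2))).toList (-1)).map Prod.fst)

def sent_tokenizer (texts : String) : List String :=
  let st := texts.toList.foldl (sentStepA texts) (0, 0, [], none)
  if st.1 < PySem.Str.len texts then st.2.2.1 ++ [PySem.Str.slice texts (some st.1) none]
  else st.2.2.1

-- ===== PORT B =====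
-- Source B: runs = [''.join(g) for _, g in groupby(texts, key=lambda c: c in punt_list)] — maximal
-- constant-key runs, which is exactly List.splitBy on equality of the key; then one fold over
-- enumerate(runs) accumulating the current sentence.
def pvKey (c : Char) : Bool := decide (c ∈ pvPunt)

def sentStepB (L : Nat) (st : List Char × List String) (ir : Int × List Char) :
    List Char × List String :=
  let cur := st.1 ++ ir.2
  if pvKey (ir.2.headD ' ') = true ∧ ir.1 < (L : Int) - 1 then ([], st.2 ++ [String.ofList cur])
  else (cur, st.2)

def sent_tokenizer_alt (texts : String) : List String :=
  let runs := List.splitBy (fun a b => pvKey a == pvKey b) texts.toList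
  let st := (PySem.List.enumerate runs).foldl (sentStepB runs.length) ([], [])
  if st.1 ≠ [] then st.2 ++ [String.ofList st.1] else st.2

-- ===== PRECONDITION & SPEC =====
-- Pre_ excludes exactly the texts whose first character is punctuation: there A reads the
-- still-unassigned local variable `token` and raises NameError (it returns no value).
def Pre_sent_tokenizer (texts : String) : Prop := texts.toList.headD 'a' ∉ pvPunt
instance (texts : String) : Decidable (Pre_sent_tokenizer texts) := by
  unfold Pre_sent_tokenizer; infer_instance

def pvWitness_sent_tokenizer : String := "ab, cd. e"

def Spec_sent_tokenizer (texts : String) (out : List String) : Prop := out = sent_tokenizer_alt texts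
instance (texts : String) (out : List String) : Decidable (Spec_sent_tokenizer texts out) := by
  unfold Spec_sent_tokenizer; infer_instance

-- ===== CLAIM =====
def Claim_equal_sent_tokenizer : Prop :=
  ∀ (texts : String), Dom_sent_tokenizer texts → Pre_sent_tokenizer texts →
    Spec_sent_tokenizer texts (sent_tokenizer texts)

-- ===== LEMMAS AND PROOFS =====

-- A-side index-scan skeleton: pvStep is what one character of A's loop does to (start, sentences)
-- once the stale-`token` condition has been characterised (lemma cond_iff below).
def pvStep (texts : String) (st : Int × List String) (j : Int) : Int × List String :=
  match st with
  | (start, sentences) =>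
    if PySem.List.pyGetD texts.toList j ' ' ∈ pvPunt ∧
        PySem.List.pyGetD texts.toList (j + 1) ' ' ∉ pvPunt then
      (j + 1, sentences ++ [PySem.Str.slice texts (some start) (some (j + 1))])
    else (start, sentences)

-- A's loop state after its first m split decisions (decision indices 0..m-1).
def pvB (texts : String) (m : Nat) : Int × List String :=
  (List.range m).foldl (fun st (k : Nat) => pvStep texts st (k : Int)) (0, [])

-- A splits right after position k iff k holds punctuation followed by a non-punctuation character.
abbrev pvSplit (cs : List Char) (k : Nat) : Prop :=
  k + 1 < cs.length ∧ cs.getD k ' ' ∈ pvPunt ∧ cs.getD (k + 1) ' ' ∉ pvPunt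

-- value of A's `token` variable at the start of loop iteration k (none before iteration 1;
-- stale from the iteration before the split when iteration k-1 split).
def pvTok (cs : List Char) : Nat → Option Char
  | 0 => none
  | (k + 1) =>
    if pvSplit cs k then some (cs.getD (min (k + 1) (cs.length - 1)) ' ')
    else some (cs.getD (min (k + 2) (cs.length - 1)) ' ')

-- final assembly of each side: A appends texts[start:], B appends the pending sentence.
def pvAsmA (texts : String) (st : Int × List String) : List String :=
  if st.1 < PySem.Str.len texts then st.2 ++ [PySem.Str.slice texts (some st.1) none] else st.2

def pvAsmB (st : List Char × List String) : List String :=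
  if st.1 ≠ [] then st.2 ++ [String.ofList st.1] else st.2

-- B's fold with the enumeration index replaced by "is this the last run?".
def pvFoldB (rs : List (List Char)) (st : List Char × List String) : List Char × List String :=
  match rs with
  | [] => st
  | r :: rest =>
    if pvKey (r.headD ' ') = true ∧ rest ≠ [] then
      pvFoldB rest ([], st.2 ++ [String.ofList (st.1 ++ r)])
    else pvFoldB rest (st.1 ++ r, st.2)

lemma pvB_succ (texts : String) (m : Nat) :
    pvB texts (m + 1) = pvStep texts (pvB texts m) (m : Int) := by
  simp [pvB, List.range_succ]

lemma pvB_start_bound (texts : String) (m : Nat) :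
    0 ≤ (pvB texts m).1 ∧ (pvB texts m).1 ≤ (m : Int) := by
  induction m with
  | zero => simp [pvB]
  | succ m ih =>
    rw [pvB_succ]
    rcases hsb : pvB texts m with ⟨s, sents⟩
    rw [hsb] at ih
    simp only [pvStep]
    split
    · simp; omega
    · simp at ih ⊢; omega

lemma popLast_map_fst (xs : List Char) (h : xs ≠ []) :
    (PySem.List.pop? xs (-1)).map Prod.fst = some (xs.getD (xs.length - 1) ' ') := by
  induction xs using List.reverseRecOn with
  | nil => simp at h
  | append_singleton ys y _ =>
    rw [PySem.List.pop?_last]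
    simp [List.getD_eq_getElem?_getD]

lemma slice_last (cs : List Char) (s : Int) (b : Nat) (hs : 0 ≤ s)
    (hlt : s.toNat < cs.length) (hb : s.toNat < b) :
    (PySem.List.pop? (PySem.List.slice cs (some s) (some (b : Int))) (-1)).map Prod.fst
      = some (cs.getD (min b cs.length - 1) ' ') := by
  rw [PySem.List.slice_toNat cs hs (by positivity)]
  rw [Int.toNat_natCast b]
  set a := s.toNat with ha
  set l := List.take (b - a) (List.drop a cs) with hl
  have hlen : l.length = min (b - a) (cs.length - a) := by
    simp [hl, List.length_take, List.length_drop]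
  have hne : l ≠ [] := by
    intro hnil
    rw [hnil] at hlen; simp at hlen; omega
  rw [popLast_map_fst l hne]
  have hidx : l.getD (l.length - 1) ' ' = (cs[a + (l.length - 1)]?).getD ' ' := by
    rw [List.getD_eq_getElem?_getD, hl]
    rw [List.getElem?_take, List.getElem?_drop]
    rw [if_pos (by rw [← hl, hlen]; omega)]
  rw [hidx]
  have h2 : a + (l.length - 1) = min b cs.length - 1 := by rw [hlen]; omega
  rw [h2, List.getD_eq_getElem?_getD]

lemma headD_eq_getD (cs : List Char) (h : 0 < cs.length) : cs.headD 'a' = cs.getD 0 ' ' := by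
  cases cs with
  | nil => simp at h
  | cons c cs' => simp

lemma cond_iff (cs : List Char) (h0 : cs.headD 'a' ∉ pvPunt) (k : Nat) (hk : k < cs.length) :
    ((cs.getD k ' ' ∈ pvPunt ∧ (pvTok cs k).any (fun t => !decide (t ∈ pvPunt)) = true)
      ↔ pvSplit cs k) := by
  cases k with
  | zero =>
    constructor
    · rintro ⟨-, habs⟩
      simp [pvTok] at habs
    · rintro ⟨-, hmem, -⟩
      exfalso
      apply h0
      cases cs with
      | nil => simp at hk
      | cons c cs' => simpa using hmem
  | succ j =>
    by_cases hs : pvSplit cs j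
    · constructor
      · rintro ⟨hmem, -⟩
        exact absurd hmem hs.2.2
      · rintro ⟨-, hmem, -⟩
        exact absurd hmem hs.2.2
    · have ht : pvTok cs (j + 1) = some (cs.getD (min (j + 2) (cs.length - 1)) ' ') := by
        simp [pvTok, hs]
      rw [ht]
      by_cases h2 : j + 2 < cs.length
      · have hmin : min (j + 2) (cs.length - 1) = j + 2 := by omega
        rw [hmin]
        simp [pvSplit, h2]
      · have hmin : min (j + 2) (cs.length - 1) = j + 1 := by omega
        rw [hmin]
        constructor
        · rintro ⟨hmem, hany⟩
          simp at hany
          exact absurd hmem hany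
        · rintro ⟨hlen2, -, -⟩
          omega

lemma sentInv (texts : String) (h0 : texts.toList.headD 'a' ∉ pvPunt) :
    ∀ k, k ≤ texts.toList.length →
    (texts.toList.take k).foldl (sentStepA texts) (0, 0, [], none)
      = ((pvB texts (min k (texts.toList.length - 1))).1, (k : Int),
         (pvB texts (min k (texts.toList.length - 1))).2, pvTok texts.toList k) := by
  intro k
  induction k with
  | zero => intro _; simp [pvB, pvTok]
  | succ k ih =>
    intro hk1
    set cs := texts.toList with hcs
    have hk : k < cs.length := by omega
    have hmin : min k (cs.length - 1) = k := by omega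
    have hget : cs[k] = cs.getD k ' ' := (List.getD_eq_getElem cs ' ' hk).symm
    rw [List.take_add_one, List.getElem?_eq_getElem hk]
    rw [List.foldl_append, ih (by omega)]
    simp only [Option.toList_some, List.foldl_cons, List.foldl_nil]
    rw [hmin]
    by_cases hc : pvSplit cs k
    · -- split step
      have hklt : k + 1 < cs.length := hc.1
      have hmin' : min (k + 1) (cs.length - 1) = k + 1 := by omega
      have hcond : cs[k] ∈ pvPunt ∧ (pvTok cs k).any (fun t => !decide (t ∈ pvPunt)) = true := by
        rw [hget]; exact (cond_iff cs h0 k hk).mpr hc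
      rw [hmin', pvB_succ]
      have hBcond : PySem.List.pyGetD cs ((k : Nat) : Int) ' ' ∈ pvPunt ∧
          PySem.List.pyGetD cs (((k : Nat) : Int) + 1) ' ' ∉ pvPunt := by
        constructor
        · rw [PySem.List.pyGetD_natCast]; exact hc.2.1
        · rw [show ((k : Nat) : Int) + 1 = (((k + 1 : Nat)) : Int) by push_cast; ring,
            PySem.List.pyGetD_natCast]
          exact hc.2.2
      simp only [sentStepA, pvStep]
      rw [if_pos hcond, if_pos hBcond]
      have htok : pvTok cs k = some (cs.getD (min (k + 1) (cs.length - 1)) ' ') := by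
        cases k with
        | zero =>
          exfalso
          apply h0
          rw [headD_eq_getD cs (by omega)]
          exact hc.2.1
        | succ j =>
          have hnsj : ¬ pvSplit cs j := fun hsj => hsj.2.2 hc.2.1
          simp only [pvTok]
          rw [if_neg hnsj, show min (j + 1 + 1) (cs.length - 1) = min (j + 2) (cs.length - 1)
            from by omega]
      have htok2 : pvTok cs (k + 1) = some (cs.getD (min (k + 1) (cs.length - 1)) ' ') := by
        simp only [pvTok]
        rw [if_pos hc]
      rw [htok, htok2]
      refine Prod.ext rfl (Prod.ext ?_ rfl)
      push_cast; ring
    · -- else step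
      have hcond : ¬ (cs[k] ∈ pvPunt ∧ (pvTok cs k).any (fun t => !decide (t ∈ pvPunt)) = true) := by
        rw [hget]; exact fun h => hc ((cond_iff cs h0 k hk).mp h)
      simp only [sentStepA]
      rw [if_neg hcond]
      have hsb := pvB_start_bound texts k
      have e1 : 0 ≤ (pvB texts k).1 := hsb.1
      have e2 : (pvB texts k).1 ≤ (k : Int) := hsb.2
      have hslice : (PySem.List.pop? (PySem.Str.slice texts (some (pvB texts k).1)
            (some (((k : Nat) : Int) + 1 + 2))).toList (-1)).map Prod.fst
          = some (cs.getD (min (k + 3) cs.length - 1) ' ') := by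
        rw [show ((k : Nat) : Int) + 1 + 2 = (((k + 3 : Nat)) : Int) by push_cast; ring]
        rw [PySem.Str.toList_slice, PySem.Chars.slice_eq_listSlice, ← hcs]
        have htn : ((pvB texts k).1).toNat ≤ k := by omega
        exact slice_last cs (pvB texts k).1 (k + 3) hsb.1 (by omega) (by omega)
      rw [hslice]
      have htok2 : pvTok cs (k + 1) = some (cs.getD (min (k + 3) cs.length - 1) ' ') := by
        simp only [pvTok]
        rw [if_neg hc, show min (k + 2) (cs.length - 1) = min (k + 3) cs.length - 1 from by omega]
      rw [htok2]
      by_cases hkl : k + 1 ≤ cs.length - 1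
      · have hmin' : min (k + 1) (cs.length - 1) = k + 1 := by omega
        rw [hmin', pvB_succ]
        have hBcond : ¬ (PySem.List.pyGetD cs ((k : Nat) : Int) ' ' ∈ pvPunt ∧
            PySem.List.pyGetD cs (((k : Nat) : Int) + 1) ' ' ∉ pvPunt) := by
          rintro ⟨h1, h2⟩
          apply hc
          rw [PySem.List.pyGetD_natCast] at h1
          rw [show ((k : Nat) : Int) + 1 = (((k + 1 : Nat)) : Int) by push_cast; ring,
            PySem.List.pyGetD_natCast] at h2
          exact ⟨by omega, h1, h2⟩
        simp only [pvStep, ← hcs]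
        rw [if_neg hBcond]
        refine Prod.ext rfl (Prod.ext ?_ rfl)
        push_cast; ring
      · have hmin' : min (k + 1) (cs.length - 1) = k := by omega
        rw [hmin']
        refine Prod.ext rfl (Prod.ext ?_ rfl)
        push_cast; ring

-- ---- stage 2: the index scan equals the runs-based assembly ----

lemma pvKey_iff (c : Char) : pvKey c = true ↔ c ∈ pvPunt := by simp [pvKey]

lemma pvGetD_mem (r : List Char) (t : Nat) (ht : t < r.length) : r.getD t ' ' ∈ r := by
  rw [List.getD_eq_getElem r ' ' ht]; exact List.getElem_mem ht

lemma pvGetDrop (cs : List Char) (o t : Nat) : cs.getD (o + t) ' ' = (cs.drop o).getD t ' ' := by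
  simp [List.getD_eq_getElem?_getD, List.getElem?_drop]

lemma pvFoldB_cons (r : List Char) (rest : List (List Char)) (st : List Char × List String) :
    pvFoldB (r :: rest) st = if pvKey (r.headD ' ') = true ∧ rest ≠ [] then
      pvFoldB rest ([], st.2 ++ [String.ofList (st.1 ++ r)])
    else pvFoldB rest (st.1 ++ r, st.2) := rfl

lemma pvEnumFold (L : Nat) : ∀ (rs : List (List Char)) (j : Nat) (st : List Char × List String),
    j + rs.length = L →
    (PySem.List.enumerate rs (j : Int)).foldl (sentStepB L) st = pvFoldB rs st := by
  intro rs
  induction rs with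
  | nil => intro j st _; simp [PySem.List.enumerate_nil, pvFoldB]
  | cons r rest ih =>
    intro j st hL
    rw [PySem.List.enumerate_cons, List.foldl_cons, pvFoldB_cons]
    have hcast : (j : Int) + 1 = ((j + 1 : Nat) : Int) := by push_cast; ring
    by_cases hcond : pvKey (r.headD ' ') = true ∧ rest ≠ []
    · have hj : (j : Int) < (L : Int) - 1 := by
        rcases hcond with ⟨-, hrne⟩
        cases rest with
        | nil => simp at hrne
        | cons _ _ => simp only [List.length_cons] at hL; omega
      rw [if_pos hcond]
      have hstep : sentStepB L st ((j : Int), r) = ([], st.2 ++ [String.ofList (st.1 ++ r)]) := by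
        simp only [sentStepB]
        rw [if_pos ⟨hcond.1, hj⟩]
      rw [hstep, hcast, ih (j + 1) _ (by simp at hL ⊢; omega)]
    · rw [if_neg hcond]
      have hstep : sentStepB L st ((j : Int), r) = (st.1 ++ r, st.2) := by
        simp only [sentStepB]
        rw [if_neg]
        rintro ⟨h1, h2⟩
        apply hcond
        refine ⟨h1, ?_⟩
        cases rest with
        | nil => simp at hL; omega
        | cons _ _ => simp
      rw [hstep, hcast, ih (j + 1) _ (by simp at hL ⊢; omega)]

lemma pvNoFire (texts : String) : ∀ (m a : Nat) (st : Int × List String),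
    (∀ k : Nat, a ≤ k → k < a + m →
      ¬(texts.toList.getD k ' ' ∈ pvPunt ∧ texts.toList.getD (k + 1) ' ' ∉ pvPunt)) →
    (List.range' a m).foldl (fun st (k : Nat) => pvStep texts st (k : Int)) st = st := by
  intro m
  induction m with
  | zero => intro a st _; simp
  | succ m ih =>
    intro a st h
    rw [List.range'_succ, List.foldl_cons]
    have hstep : pvStep texts st ((a : Nat) : Int) = st := by
      rcases st with ⟨s0, se⟩
      simp only [pvStep]
      rw [if_neg]
      rw [PySem.List.pyGetD_natCast,
        show ((a : Nat) : Int) + 1 = ((a + 1 : Nat) : Int) by push_cast; ring,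
        PySem.List.pyGetD_natCast]
      exact h a le_rfl (by omega)
    rw [hstep]
    exact ih (a + 1) st (fun k hk1 hk2 => h k (by omega) (by omega))

lemma pvSegExt (cs : List Char) (s o : Nat) (r tail : List Char) (hso : s ≤ o)
    (h : cs.drop o = r ++ tail) :
    (cs.drop s).take (o - s) ++ r = (cs.drop s).take (o + r.length - s) := by
  rw [show o + r.length - s = (o - s) + r.length by omega, List.take_add]
  congr 1
  rw [List.drop_drop, show s + (o - s) = o by omega, h, List.take_left]

lemma pvKeyConst : ∀ (r : List Char), r.IsChain (fun x y => (pvKey x == pvKey y) = true) →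
    ∀ c ∈ r, pvKey c = pvKey (r.headD ' ') := by
  intro r
  induction r with
  | nil => intro _ c hc; simp at hc
  | cons a l ih =>
    intro hch c hc
    rcases List.isChain_cons.mp hch with ⟨hhd, htl⟩
    rcases List.mem_cons.mp hc with rfl | hc'
    · simp
    · cases l with
      | nil => simp at hc'
      | cons b l' =>
        have hab : pvKey a = pvKey b := eq_of_beq (hhd b (by simp))
        have := ih htl c hc'
        simp only [List.headD_cons] at this ⊢
        rw [this, hab]

lemma pvHeadsChain : ∀ (rs : List (List Char)),
    (∀ r ∈ rs, r ≠ []) →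
    (∀ r ∈ rs, ∀ c ∈ r, pvKey c = pvKey (r.headD ' ')) →
    rs.IsChain (fun a b => ∃ ha hb, ((pvKey (a.getLast ha) == pvKey (b.head hb)) = false)) →
    rs.IsChain (fun a b => pvKey (a.headD ' ') ≠ pvKey (b.headD ' ')) := by
  intro rs
  induction rs with
  | nil => intro _ _ _; exact List.isChain_nil
  | cons r rest ih =>
    intro hne hconst hch
    rcases List.isChain_cons.mp hch with ⟨hhd, htl⟩
    refine List.isChain_cons.mpr ⟨?_, ih (fun x hx => hne x (by simp [hx]))
      (fun x hx => hconst x (by simp [hx])) htl⟩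
    intro b hb
    rcases hhd b hb with ⟨ha, hb', hfalse⟩
    have h1 : pvKey (r.getLast ha) = pvKey (r.headD ' ') :=
      hconst r (by simp) _ (List.getLast_mem ha)
    have h2 : pvKey (b.head hb') = pvKey (b.headD ' ') := by
      cases b with
      | nil => simp at hb'
      | cons x xs => simp
    intro heq
    rw [h1, h2, heq] at hfalse
    simp at hfalse

lemma pvChunk (texts : String) (a m₁ m₂ : Nat) (st : Int × List String) :
    (List.range' a (m₁ + m₂)).foldl (fun st (k : Nat) => pvStep texts st (k : Int)) st
      = (List.range' (a + m₁) m₂).foldl (fun st (k : Nat) => pvStep texts st (k : Int))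
          ((List.range' a m₁).foldl (fun st (k : Nat) => pvStep texts st (k : Int)) st) := by
  have h := List.range'_append (s := a) (m := m₁) (n := m₂) (step := 1)
  rw [one_mul] at h
  rw [← h, List.foldl_append]

lemma pvMain (texts : String) : ∀ (rs : List (List Char)) (o : Nat) (start : Int)
    (sents : List String),
    texts.toList.drop o = rs.flatten →
    0 ≤ start → start.toNat ≤ o → o ≤ texts.toList.length →
    (∀ r ∈ rs, r ≠ []) →
    (∀ r ∈ rs, ∀ c ∈ r, pvKey c = pvKey (r.headD ' ')) →
    rs.IsChain (fun a b => pvKey (a.headD ' ') ≠ pvKey (b.headD ' ')) →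
    pvAsmA texts ((List.range' o (texts.toList.length - 1 - o)).foldl
        (fun st (k : Nat) => pvStep texts st (k : Int)) (start, sents))
      = pvAsmB (pvFoldB rs ((texts.toList.drop start.toNat).take (o - start.toNat), sents)) := by
  intro rs
  induction rs with
  | nil =>
    intro o start sents hflat hs0 hso hon _ _ _
    have hno : texts.toList.length ≤ o := by
      have := congrArg List.length hflat
      simp only [List.length_drop, List.flatten_nil, List.length_nil] at this
      omega
    rw [show texts.toList.length - 1 - o = 0 by omega]
    simp only [List.range'_zero, List.foldl_nil, pvFoldB]
    by_cases hst : start < (texts.toList.length : Int)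
    · simp only [pvAsmA, pvAsmB]
      rw [PySem.Str.len_eq, if_pos hst]
      have hseg : (texts.toList.drop start.toNat).take (o - start.toNat)
          = texts.toList.drop start.toNat :=
        List.take_of_length_le (by simp only [List.length_drop]; omega)
      rw [hseg, if_pos (by rw [ne_eq, List.drop_eq_nil_iff]; omega)]
      congr 2
      apply String.toList_inj.mp
      rw [String.toList_ofList, PySem.Str.toList_slice, PySem.Chars.slice_eq_listSlice,
        PySem.List.slice_from _ hs0]
    · simp only [pvAsmA, pvAsmB]
      rw [PySem.Str.len_eq, if_neg hst]
      rw [if_neg (by rw [ne_eq, not_not, show o - start.toNat = 0 by omega, List.take_zero])]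
  | cons r rest ih =>
    intro o start sents hflat hs0 hso hon hne hconst hchain
    have hrne : r ≠ [] := hne r (by simp)
    have hrl : 0 < r.length := by
      cases r with
      | nil => exact absurd rfl hrne
      | cons a l => simp
    have hlen : texts.toList.length - o = r.length + rest.flatten.length := by
      have := congrArg List.length hflat
      simp only [List.length_drop, List.flatten_cons, List.length_append] at this
      omega
    cases rest with
    | nil =>
      have hr : texts.toList.drop o = r := by simpa using hflat
      have ho' : o + r.length = texts.toList.length := by
        simp only [List.flatten_nil, List.length_nil] at hlen; omega
      have hnf : (List.range' o (texts.toList.length - 1 - o)).foldl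
          (fun st (k : Nat) => pvStep texts st (k : Int)) (start, sents) = (start, sents) := by
        apply pvNoFire
        intro k hk1 hk2
        by_cases hkey : pvKey (r.headD ' ') = true
        · rintro ⟨-, h2⟩
          apply h2
          have hv : texts.toList.getD (k + 1) ' ' = r.getD (k + 1 - o) ' ' := by
            have h := pvGetDrop texts.toList o (k + 1 - o)
            rw [hr, show o + (k + 1 - o) = k + 1 by omega] at h
            exact h
          rw [hv, ← pvKey_iff, hconst r (by simp) _ (pvGetD_mem r _ (by omega))]
          exact hkey
        · rintro ⟨h1, -⟩
          have hv : texts.toList.getD k ' ' = r.getD (k - o) ' ' := by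
            have h := pvGetDrop texts.toList o (k - o)
            rw [hr, show o + (k - o) = k by omega] at h
            exact h
          rw [hv, ← pvKey_iff, hconst r (by simp) _ (pvGetD_mem r _ (by omega))] at h1
          exact hkey h1
      rw [hnf, pvFoldB_cons, if_neg (by simp)]
      simp only [pvFoldB, pvAsmA, pvAsmB]
      have hstn : start < (texts.toList.length : Int) := by omega
      rw [PySem.Str.len_eq, if_pos hstn]
      have hseg : (texts.toList.drop start.toNat).take (o - start.toNat) ++ r
          = texts.toList.drop start.toNat := by
        rw [pvSegExt texts.toList start.toNat o r [] hso (by simpa using hr)]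
        exact List.take_of_length_le (by simp only [List.length_drop]; omega)
      rw [if_pos (by simp [hrne])]
      congr 2
      apply String.toList_inj.mp
      rw [String.toList_ofList, hseg, PySem.Str.toList_slice, PySem.Chars.slice_eq_listSlice,
        PySem.List.slice_from _ hs0]
    | cons r2 rest' =>
      have hr2ne : r2 ≠ [] := hne r2 (by simp)
      have hr2l : 0 < r2.length := by
        cases r2 with
        | nil => exact absurd rfl hr2ne
        | cons a l => simp
      have hfl : 0 < (r2 :: rest').flatten.length := by
        simp only [List.flatten_cons, List.length_append]; omega
      have ho'n : o + r.length ≤ texts.toList.length - 1 := by omega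
      have hflat' : texts.toList.drop (o + r.length) = (r2 :: rest').flatten := by
        rw [← List.drop_drop, hflat, List.flatten_cons, List.drop_left]
      have hne' : ∀ x ∈ r2 :: rest', x ≠ [] := fun x hx => hne x (by simp [hx])
      have hconst' : ∀ x ∈ r2 :: rest', ∀ c ∈ x, pvKey c = pvKey (x.headD ' ') :=
        fun x hx => hconst x (List.mem_cons_of_mem _ hx)
      have hchain' := (List.isChain_cons.mp hchain).2
      have hrunval : ∀ t, t < r.length → texts.toList.getD (o + t) ' ' = r.getD t ' ' := by
        intro t ht
        rw [pvGetDrop, hflat, List.flatten_cons]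
        exact List.getD_append r _ ' ' t ht
      by_cases hkey : pvKey (r.headD ' ') = true
      · -- punctuation run followed by a non-punctuation run: A fires at index o + r.length - 1
        have hk2 : pvKey (r2.headD ' ') = false := by
          have hd := (List.isChain_cons.mp hchain).1 r2 (by simp)
          cases h2 : pvKey (r2.headD ' ') with
          | false => rfl
          | true => exact absurd (hkey.trans h2.symm) hd
        have hgD2 : texts.toList.getD (o + r.length) ' ' = r2.headD ' ' := by
          rw [pvGetDrop, hflat, List.flatten_cons, List.getD_eq_getElem?_getD,
            List.getElem?_append_right (le_refl r.length), Nat.sub_self]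
          cases r2 with
          | nil => exact absurd rfl hr2ne
          | cons c cr => simp [List.flatten_cons]
        rw [show texts.toList.length - 1 - o
            = (r.length - 1) + (1 + (texts.toList.length - 1 - (o + r.length))) by omega]
        rw [pvChunk]
        have hnf : (List.range' o (r.length - 1)).foldl
            (fun st (k : Nat) => pvStep texts st (k : Int)) (start, sents) = (start, sents) := by
          apply pvNoFire
          intro k hk1 hk2
          rintro ⟨-, h2⟩
          apply h2
          have hv : texts.toList.getD (k + 1) ' ' = r.getD (k + 1 - o) ' ' := by
            have h := hrunval (k + 1 - o) (by omega)
            rw [show o + (k + 1 - o) = k + 1 by omega] at h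
            exact h
          rw [hv, ← pvKey_iff, hconst r (by simp) _ (pvGetD_mem r _ (by omega))]
          exact hkey
        rw [hnf, Nat.add_comm 1, List.range'_succ, List.foldl_cons]
        have hstep : pvStep texts (start, sents) ((o + (r.length - 1) : Nat) : Int)
            = (((o + r.length : Nat) : Int),
               sents ++ [PySem.Str.slice texts (some start) (some ((o + r.length : Nat) : Int))]) := by
          simp only [pvStep]
          rw [PySem.List.pyGetD_natCast,
            show ((o + (r.length - 1) : Nat) : Int) + 1 = ((o + r.length : Nat) : Int) by
              push_cast; omega,
            PySem.List.pyGetD_natCast]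
          have hcnd : texts.toList.getD (o + (r.length - 1)) ' ' ∈ pvPunt ∧
              texts.toList.getD (o + r.length) ' ' ∉ pvPunt := by
            constructor
            · have hv : texts.toList.getD (o + (r.length - 1)) ' ' = r.getD (r.length - 1) ' ' :=
                hrunval (r.length - 1) (by omega)
              rw [hv, ← pvKey_iff, hconst r (by simp) _ (pvGetD_mem r _ (by omega))]
              exact hkey
            · rw [hgD2, ← pvKey_iff, hk2]
              simp
          rw [if_pos hcnd]
        rw [show o + (r.length - 1) + 1 = o + r.length by omega, hstep]
        have hseg : (texts.toList.drop start.toNat).take (o - start.toNat) ++ r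
            = (texts.toList.drop start.toNat).take (o + r.length - start.toNat) :=
          pvSegExt texts.toList start.toNat o r (r2 :: rest').flatten hso
            (by rw [hflat, List.flatten_cons])
        have hslice : PySem.Str.slice texts (some start) (some ((o + r.length : Nat) : Int))
            = String.ofList ((texts.toList.drop start.toNat).take (o - start.toNat) ++ r) := by
          apply String.toList_inj.mp
          rw [String.toList_ofList, hseg, PySem.Str.toList_slice, PySem.Chars.slice_eq_listSlice,
            PySem.List.slice_toNat _ hs0 (by positivity), Int.toNat_natCast]
        have hIH := ih (o + r.length) ((o + r.length : Nat) : Int)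
          (sents ++ [PySem.Str.slice texts (some start) (some ((o + r.length : Nat) : Int))])
          hflat' (by positivity) (by simp) (by omega) hne' hconst' hchain'
        rw [Int.toNat_natCast, Nat.sub_self, List.take_zero] at hIH
        rw [pvFoldB_cons, if_pos ⟨hkey, List.cons_ne_nil r2 rest'⟩, ← hslice]
        exact hIH
      · -- non-punctuation run: A does not fire anywhere inside it
        rw [show texts.toList.length - 1 - o
            = r.length + (texts.toList.length - 1 - (o + r.length)) by omega]
        rw [pvChunk]
        have hnf : (List.range' o r.length).foldl
            (fun st (k : Nat) => pvStep texts st (k : Int)) (start, sents) = (start, sents) := by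
          apply pvNoFire
          intro k hk1 hk2
          rintro ⟨h1, -⟩
          have hv : texts.toList.getD k ' ' = r.getD (k - o) ' ' := by
            have h := hrunval (k - o) (by omega)
            rw [show o + (k - o) = k by omega] at h
            exact h
          rw [hv, ← pvKey_iff, hconst r (by simp) _ (pvGetD_mem r _ (by omega))] at h1
          exact hkey h1
        rw [hnf]
        have hseg : (texts.toList.drop start.toNat).take (o - start.toNat) ++ r
            = (texts.toList.drop start.toNat).take (o + r.length - start.toNat) :=
          pvSegExt texts.toList start.toNat o r (r2 :: rest').flatten hso
            (by rw [hflat, List.flatten_cons])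
        have hIH := ih (o + r.length) start sents hflat' hs0 (by omega) (by omega)
          hne' hconst' hchain'
        rw [pvFoldB_cons, if_neg (fun h => hkey h.1), hseg]
        exact hIH

-- ===== VERDICT =====
theorem sent_tokenizer_spec : Claim_equal_sent_tokenizer := by
  unfold Claim_equal_sent_tokenizer
  intro texts _ hpre
  unfold Spec_sent_tokenizer
  have hA : sent_tokenizer texts = pvAsmA texts (pvB texts (texts.toList.length - 1)) := by
    have h := sentInv texts hpre texts.toList.length le_rfl
    rw [List.take_length] at h
    rw [show min texts.toList.length (texts.toList.length - 1) = texts.toList.length - 1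
      by omega] at h
    simp only [sent_tokenizer, pvAsmA, h]
  have hne : ∀ x ∈ List.splitBy (fun a b => pvKey a == pvKey b) texts.toList, x ≠ [] :=
    fun x hx => List.ne_nil_of_mem_splitBy hx
  have hconst : ∀ x ∈ List.splitBy (fun a b => pvKey a == pvKey b) texts.toList,
      ∀ c ∈ x, pvKey c = pvKey (x.headD ' ') :=
    fun x hx => pvKeyConst x (List.isChain_of_mem_splitBy hx)
  have hchain := pvHeadsChain _ hne hconst
    (List.isChain_getLast_head_splitBy (fun a b => pvKey a == pvKey b) texts.toList)
  have hB : sent_tokenizer_alt texts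
      = pvAsmB (pvFoldB (List.splitBy (fun a b => pvKey a == pvKey b) texts.toList) ([], [])) := by
    have he := pvEnumFold (List.splitBy (fun a b => pvKey a == pvKey b) texts.toList).length
      (List.splitBy (fun a b => pvKey a == pvKey b) texts.toList) 0 ([], []) (by simp)
    simp only [Nat.cast_zero] at he
    simp only [sent_tokenizer_alt, pvAsmB, he]
  have key := pvMain texts (List.splitBy (fun a b => pvKey a == pvKey b) texts.toList) 0 0 []
    (by simp [List.flatten_splitBy]) le_rfl (by simp) (by simp) hne hconst hchain
  simp only [Nat.sub_zero, Int.toNat_zero, List.take_zero, List.drop_zero] at key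
  rw [hA, hB, ← key, pvB, List.range_eq_range']
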